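-- pv_equiv track=rewrite | github.com/amol-ship-it/agi-core | domains/arc/transformation_primitives.py | outline
-- ===== SOURCE A (Python) =====
-- Grid = list[list[int]]
--
-- def outline(grid: Grid) -> Grid:
--     """Extract edges: keep non-zero pixels that have at least one zero 4-neighbor.
--
--     Equivalent to diff(input, erode(input)). Justified by task 4347f46a.
--     """
--     if not grid or not grid[0]:
--         return grid
--     h, w = len(grid), len(grid[0])
--     result = [[0] * w for _ in range(h)]
--     for r in range(h):
--         for c in range(w):
--             if grid[r][c] == 0:
--                 continue
--             is_edge = False
--             for dr, dc in [(-1, 0), (1, 0), (0, -1), (0, 1)]: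
--                 nr, nc = r + dr, c + dc
--                 if nr < 0 or nr >= h or nc < 0 or nc >= w or grid[nr][nc] == 0:
--                     is_edge = True
--                     break
--             if is_edge:
--                 result[r][c] = grid[r][c]
--     return result
-- ===== SOURCE B (Python) =====
-- Grid = list[list[int]]
--
-- def outline(grid: Grid) -> Grid:
--     """Scatter from zeros: mark all border cells (their out-of-bounds neighbor
--     counts as zero) and the 4-neighbors of every zero cell, then keep exactly
--     the nonzero pixels whose coordinates are marked."""
--     if not grid or not grid[0]:
--         return grid
--     h, w = len(grid), len(grid[0])
--     mark = set()
--     for r in range(h):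
--         mark.add((r, 0))
--         mark.add((r, w - 1))
--     for c in range(w):
--         mark.add((0, c))
--         mark.add((h - 1, c))
--     for r in range(h):
--         for c in range(w):
--             if grid[r][c] == 0:
--                 mark.add((r - 1, c))
--                 mark.add((r + 1, c))
--                 mark.add((r, c - 1))
--                 mark.add((r, c + 1))
--     return [[grid[r][c] if grid[r][c] != 0 and (r, c) in mark else 0
--              for c in range(w)] for r in range(h)]
-- ===== Notes on version B (the rewrite author's own statement) =====
-- stated objective: alternative
-- what changed: B inverts the traversal: instead of A's gather loop that tests each nonzero cell's four neighbors with an is_edge flag and break, B scatters marks FROM zero cells into a set (plus all border coordinates, whose out-of-bounds neighbor counts as zero) and then keeps exactly the nonzero pixels whose coordinates are in the set.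
import Mathlib
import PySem

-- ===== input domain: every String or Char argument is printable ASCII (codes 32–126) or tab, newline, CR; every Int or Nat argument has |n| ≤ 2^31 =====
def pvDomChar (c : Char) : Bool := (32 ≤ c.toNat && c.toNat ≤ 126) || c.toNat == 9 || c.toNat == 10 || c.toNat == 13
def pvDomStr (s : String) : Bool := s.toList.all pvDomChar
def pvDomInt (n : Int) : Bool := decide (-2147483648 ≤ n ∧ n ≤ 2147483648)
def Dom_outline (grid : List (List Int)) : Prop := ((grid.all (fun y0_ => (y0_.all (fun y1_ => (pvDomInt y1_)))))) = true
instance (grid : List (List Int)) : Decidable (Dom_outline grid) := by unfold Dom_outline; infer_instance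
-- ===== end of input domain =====

-- B scatters marks from zero cells into a set (plus the border coordinates, whose
-- out-of-bounds neighbor counts as zero) and keeps the marked nonzero pixels, instead of
-- A's gather loop testing each nonzero cell's neighbors (alternative decomposition, same cost).

-- ===== PORT A =====
-- Literal port of A. Indexing grid[r][c] / grid[nr][nc] is via getD; inside Pre_outline
-- every executed access is in range, so getD is exact there.
def outline (grid : List (List Int)) : List (List Int) :=
  if grid = [] ∨ grid.headD [] = [] then grid
  else
    let h := grid.length
    let w := (grid.headD []).length
    let result : List (List Int) := List.replicate h (List.replicate w (0 : Int))
    (List.range h).foldl (fun res r =>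
      (List.range w).foldl (fun res c =>
        if (grid.getD r []).getD c 0 = 0 then res
        else
          -- `List.any` short-circuits exactly like Python's for-loop with break
          if [((-1 : Int), (0 : Int)), (1, 0), (0, -1), (0, 1)].any (fun d =>
              decide ((r : Int) + d.1 < 0 ∨ (h : Int) ≤ (r : Int) + d.1 ∨
                      (c : Int) + d.2 < 0 ∨ (w : Int) ≤ (c : Int) + d.2 ∨
                      (grid.getD ((r : Int) + d.1).toNat []).getD ((c : Int) + d.2).toNat 0 = 0))
          then res.set r ((res.getD r []).set c ((grid.getD r []).getD c 0))
          else res) res) result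

-- ===== PORT B =====
-- Literal port of Source B: three marking loops building the set `mark`, then the comprehension.
def outline_alt (grid : List (List Int)) : List (List Int) :=
  if grid.isEmpty || (grid.headD []).isEmpty then grid
  else
    let h := grid.length
    let w := (grid.headD []).length
    let mark : PySem.Set (Int × Int) :=
      (List.range h).foldl (fun s (r : Nat) =>
        PySem.Set.add (PySem.Set.add s ((r : Int), (0 : Int))) ((r : Int), (w : Int) - 1))
        PySem.Set.empty
    let mark : PySem.Set (Int × Int) :=
      (List.range w).foldl (fun s (c : Nat) =>
        PySem.Set.add (PySem.Set.add s ((0 : Int), (c : Int))) ((h : Int) - 1, (c : Int))) mark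
    let mark : PySem.Set (Int × Int) :=
      (List.range h).foldl (fun s r =>
        (List.range w).foldl (fun s c =>
          if (grid.getD r []).getD c 0 = 0 then
            PySem.Set.add (PySem.Set.add (PySem.Set.add (PySem.Set.add s
              ((r : Int) - 1, (c : Int))) ((r : Int) + 1, (c : Int)))
              ((r : Int), (c : Int) - 1)) ((r : Int), (c : Int) + 1)
          else s) s) mark
    (List.range h).map (fun r => (List.range w).map (fun c =>
      if (grid.getD r []).getD c 0 ≠ 0 ∧ ((r : Int), (c : Int)) ∈ mark
      then (grid.getD r []).getD c 0 else 0))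

-- ===== PRECONDITION & SPEC =====
-- Pre_ excludes exactly the ragged grids on which Python A raises IndexError
-- (some row shorter than the first row); A returns normally on everything else.
def Pre_outline (grid : List (List Int)) : Prop :=
  ∀ row ∈ grid, (grid.headD []).length ≤ row.length
instance (grid : List (List Int)) : Decidable (Pre_outline grid) := by
  unfold Pre_outline; infer_instance

def pvWitness_outline : List (List Int) := [[1, 0], [2, 3]]

def Spec_outline (grid : List (List Int)) (out : List (List Int)) : Prop := out = outline_alt grid
instance (grid : List (List Int)) (out : List (List Int)) : Decidable (Spec_outline grid out) := by unfold Spec_outline; infer_instance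

-- ===== CLAIM (what is proved, stated in full; the proofs are below) =====
def Claim_equal_outline : Prop := ∀ (grid : List (List Int)), Dom_outline grid → Pre_outline grid → Spec_outline grid (outline grid)

-- ===== LEMMAS AND PROOFS =====

lemma getD_set {α} (l : List α) (i j : Nat) (a d : α) :
    (l.set i a).getD j d = if i = j ∧ i < l.length then a else l.getD j d := by
  simp only [List.getD_eq_getElem?_getD, List.getElem?_set]
  by_cases h1 : i = j
  · subst h1
    by_cases h2 : i < l.length
    · simp [h2]
    · rw [List.getElem?_eq_none (by omega : l.length ≤ i)]; simp [h2]
  · simp [h1]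

lemma set_getD_self {α} (l : List α) (i : Nat) (d : α) (h : i < l.length) :
    l.set i (l.getD i d) = l := by
  rw [List.getD_eq_getElem l d h]; exact List.set_getElem_self h

-- a fold that only conditionally sets entries preserves length
lemma foldl_condset_length (v : Nat → Int) (P : Nat → Bool) :
    ∀ (cs : List Nat) (row : List Int),
      (cs.foldl (fun row c => if P c then row.set c (v c) else row) row).length = row.length := by
  intro cs
  induction cs with
  | nil => intro row; rfl
  | cons c cs ih =>
    intro row
    simp only [List.foldl_cons]
    split <;> simp [ih]

-- entries after folding conditional sets over range n
lemma foldl_condset_getD (v : Nat → Int) (P : Nat → Bool) :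
    ∀ (n : Nat) (row : List Int) (j : Nat), j < row.length →
      (((List.range n).foldl (fun row c => if P c then row.set c (v c) else row) row).getD j 0)
        = if j < n ∧ P j then v j else row.getD j 0 := by
  intro n
  induction n with
  | zero => intro row j hj; simp
  | succ n ih =>
    intro row j hj
    rw [List.range_succ, List.foldl_append, List.foldl_cons, List.foldl_nil]
    have hlen : ((List.range n).foldl (fun row c => if P c then row.set c (v c) else row) row).length = row.length :=
      foldl_condset_length v P _ row
    by_cases hP : P n
    · simp only [hP, if_true]
      by_cases hjn : j = n
      · subst hjn
        rw [List.getD_eq_getElem _ 0 (by simp [List.length_set, hlen, hj])]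
        rw [List.getElem_set_self]
        simp [hP]
      · rw [List.getD_eq_getElem _ 0 (by simp [List.length_set, hlen, hj]),
            List.getElem_set_ne (by omega), ← List.getD_eq_getElem _ 0 (by omega)]
        rw [ih row j hj]
        have : (j < n ∧ P j = true) ↔ (j < n + 1 ∧ P j = true) := by
          constructor
          · rintro ⟨h1, h2⟩; exact ⟨by omega, h2⟩
          · rintro ⟨h1, h2⟩; exact ⟨by omega, h2⟩
        simp only [this]
    · simp only [hP, if_false, Bool.false_eq_true]
      rw [ih row j hj]
      by_cases hjn : j = n
      · subst hjn; simp [hP]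
      · have : (j < n ∧ P j = true) ↔ (j < n + 1 ∧ P j = true) := by
          constructor
          · rintro ⟨h1, h2⟩; exact ⟨by omega, h2⟩
          · rintro ⟨h1, h2⟩; exact ⟨by omega, h2⟩
        simp only [this]

-- a fold whose steps each rewrite row index i from its own old value
lemma foldl_setidx_length {α} (g : Nat → α → α) (d : α) :
    ∀ (cs : List Nat) (l : List α),
      (cs.foldl (fun l i => l.set i (g i (l.getD i d))) l).length = l.length := by
  intro cs
  induction cs with
  | nil => intro l; rfl
  | cons c cs ih => intro l; simp only [List.foldl_cons]; rw [ih]; simp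

lemma foldl_setidx_getD {α} (g : Nat → α → α) (d : α) :
    ∀ (n : Nat) (l : List α) (j : Nat), j < l.length →
      (((List.range n).foldl (fun l i => l.set i (g i (l.getD i d))) l).getD j d)
        = if j < n then g j (l.getD j d) else l.getD j d := by
  intro n
  induction n with
  | zero => intro l j hj; simp
  | succ n ih =>
    intro l j hj
    rw [List.range_succ, List.foldl_append, List.foldl_cons, List.foldl_nil]
    have hlen : ((List.range n).foldl (fun l i => l.set i (g i (l.getD i d))) l).length = l.length :=
      foldl_setidx_length g d _ l
    rw [getD_set, hlen]
    by_cases hjn : n = j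
    · subst hjn
      rw [if_pos ⟨rfl, hj⟩, ih l n hj]
      simp
    · rw [if_neg (by tauto), ih l j hj]
      by_cases h2 : j < n
      · rw [if_pos h2, if_pos (by omega : j < n + 1)]
      · rw [if_neg h2, if_neg (by omega : ¬ j < n + 1)]

-- folds with pointwise-equal steps under an invariant agree
lemma foldl_congr_inv {α β} (P : α → Prop) (f g : α → β → α) :
    ∀ (l : List β) (a : α), P a → (∀ x b, P x → b ∈ l → f x b = g x b ∧ P (f x b)) →
      l.foldl f a = l.foldl g a := by
  intro l
  induction l with
  | nil => intro a _ _; rfl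
  | cons b l ih =>
    intro a ha hstep
    simp only [List.foldl_cons]
    obtain ⟨heq, hP⟩ := hstep a b ha (by simp)
    rw [heq]
    exact ih _ (heq ▸ hP) (fun x b' hx hb' => hstep x b' hx (by simp [hb']))

-- one row of A's pass factors through that row of the state
lemma inner_one (v : Nat → Int) (E : Nat → Bool) (r : Nat) :
    ∀ (cs : List Nat) (res : List (List Int)), r < res.length →
      cs.foldl (fun res c =>
          if v c = 0 then res
          else if E c then res.set r ((res.getD r []).set c (v c)) else res) res
        = res.set r (cs.foldl (fun row c =>
            if v c = 0 then row
            else if E c then row.set c (v c) else row) (res.getD r [])) := by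
  intro cs
  induction cs with
  | nil => intro res hr; exact (set_getD_self res r [] hr).symm
  | cons c cs ih =>
    intro res hr
    simp only [List.foldl_cons]
    by_cases h1 : v c = 0
    · rw [if_pos h1, if_pos h1]
      exact ih res hr
    · by_cases h2 : E c
      · rw [if_neg h1, if_pos h2, if_neg h1, if_pos h2]
        rw [ih _ (by simp [hr]), List.set_set]
        congr 1
        rw [getD_set]
        simp [hr]
      · rw [if_neg h1, if_neg (by simp [h2]), if_neg h1, if_neg (by simp [h2])]
        exact ih res hr

-- proof-side abbreviations for A's cell value and edge test
def vA (grid : List (List Int)) (r c : Nat) : Int := (grid.getD r []).getD c 0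

def EA (grid : List (List Int)) (r c : Nat) : Bool :=
  [((-1 : Int), (0 : Int)), (1, 0), (0, -1), (0, 1)].any (fun d =>
    decide ((r : Int) + d.1 < 0 ∨ (grid.length : Int) ≤ (r : Int) + d.1 ∨
            (c : Int) + d.2 < 0 ∨ ((grid.headD []).length : Int) ≤ (c : Int) + d.2 ∨
            (grid.getD ((r : Int) + d.1).toNat []).getD ((c : Int) + d.2).toNat 0 = 0))

lemma A_repr (grid : List (List Int)) (hg : ¬(grid = [] ∨ grid.headD [] = [])) :
    outline grid = (List.range grid.length).map (fun r =>
      (List.range (grid.headD []).length).map (fun c =>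
        if decide (vA grid r c ≠ 0) && EA grid r c then vA grid r c else 0)) := by
  unfold outline
  rw [if_neg hg]
  show (List.range grid.length).foldl (fun res r =>
      (List.range (grid.headD []).length).foldl (fun res c =>
        if vA grid r c = 0 then res
        else if EA grid r c then res.set r ((res.getD r []).set c (vA grid r c)) else res) res)
      (List.replicate grid.length (List.replicate (grid.headD []).length 0)) = _
  rw [foldl_congr_inv (fun (res : List (List Int)) => res.length = grid.length) _
      (fun res r => res.set r ((List.range (grid.headD []).length).foldl (fun row c =>
        if vA grid r c = 0 then row
        else if EA grid r c then row.set c (vA grid r c) else row) (res.getD r [])))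
      (List.range grid.length) _ (by simp)
      (fun x b hx hb => by
        have hb' : b < x.length := by rw [hx]; exact List.mem_range.mp hb
        refine ⟨inner_one (vA grid b) (EA grid b) b _ x hb', ?_⟩
        rw [inner_one (vA grid b) (EA grid b) b _ x hb']
        simpa using hx)]
  have hstep : ∀ r, (fun (row : List Int) c =>
        if vA grid r c = 0 then row
        else if EA grid r c then row.set c (vA grid r c) else row)
      = (fun row c => if decide (vA grid r c ≠ 0) && EA grid r c then row.set c (vA grid r c) else row) := by
    intro r
    funext row c
    by_cases h1 : vA grid r c = 0
    · simp [h1]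
    · by_cases h2 : EA grid r c <;> simp [h1, h2]
  apply List.ext_getElem
  · rw [foldl_setidx_length (fun r row => List.foldl (fun row c => if vA grid r c = 0 then row else if EA grid r c = true then row.set c (vA grid r c) else row) row (List.range (grid.headD []).length)) ([] : List Int)]
    simp
  · intro r h1 h2
    have hlenL : ((List.range grid.length).foldl (fun res r => res.set r
        ((List.range (grid.headD []).length).foldl (fun row c =>
          if vA grid r c = 0 then row
          else if EA grid r c then row.set c (vA grid r c) else row) (res.getD r [])))
        (List.replicate grid.length (List.replicate (grid.headD []).length 0))).length
        = grid.length := by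
      rw [foldl_setidx_length (fun r row => List.foldl (fun row c => if vA grid r c = 0 then row else if EA grid r c = true then row.set c (vA grid r c) else row) row (List.range (grid.headD []).length)) ([] : List Int)]; simp
    have hr : r < grid.length := by rwa [hlenL] at h1
    rw [← List.getD_eq_getElem _ [] h1,
        foldl_setidx_getD (fun r row => (List.range (grid.headD []).length).foldl (fun row c =>
          if vA grid r c = 0 then row
          else if EA grid r c then row.set c (vA grid r c) else row) row) []
          grid.length _ r (by simpa using hr),
        if_pos hr]
    rw [List.getD_eq_getElem _ [] (by simpa using hr), List.getElem_replicate]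
    rw [List.getElem_map, List.getElem_range]
    rw [hstep r]
    apply List.ext_getElem
    · rw [foldl_condset_length]; simp
    · intro c hc1 hc2
      have hc : c < (grid.headD []).length := by
        rw [foldl_condset_length] at hc1; simpa using hc1
      rw [← List.getD_eq_getElem _ 0 hc1,
          foldl_condset_getD (vA grid r) (fun c => decide (vA grid r c ≠ 0) && EA grid r c)
            (grid.headD []).length _ c (by simpa using hc),
          List.getElem_map, List.getElem_range]
      by_cases hP : decide (vA grid r c ≠ 0) && EA grid r c
      · rw [if_pos ⟨hc, hP⟩, if_pos hP]
      · rw [if_neg (by tauto), if_neg hP]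
        rw [List.getD_eq_getElem _ 0 (by simpa using hc), List.getElem_replicate]

-- ===== B-side lemmas =====

-- generic membership through a fold whose step adds a (condition-dependent) batch of elements
lemma mem_foldl_step {α β : Type} [BEq α] [LawfulBEq α]
    (f : PySem.Set α → β → PySem.Set α) (Q : β → α → Prop)
    (H : ∀ s b y, y ∈ f s b ↔ y ∈ s ∨ Q b y) :
    ∀ (l : List β) (s : PySem.Set α) (y : α),
      y ∈ l.foldl f s ↔ y ∈ s ∨ ∃ b ∈ l, Q b y := by
  intro l
  induction l with
  | nil => intro s y; simp
  | cons b l ih =>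
    intro s y
    simp only [List.foldl_cons]
    rw [ih (f s b) y]
    simp only [List.mem_cons]
    constructor
    · rintro (hy | ⟨b', hb', hq⟩)
      · rcases (H s b y).mp hy with h | h
        · exact Or.inl h
        · exact Or.inr ⟨b, Or.inl rfl, h⟩
      · exact Or.inr ⟨b', Or.inr hb', hq⟩
    · rintro (hy | ⟨b', (rfl | hb'), hq⟩)
      · exact Or.inl ((H s b y).mpr (Or.inl hy))
      · exact Or.inl ((H s _ y).mpr (Or.inr hq))
      · exact Or.inr ⟨b', hb', hq⟩

-- B's mark set, named for the proofs (definitionally the chain in outline_alt)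
def markB (grid : List (List Int)) : PySem.Set (Int × Int) :=
  (List.range grid.length).foldl (fun s r =>
    (List.range (grid.headD []).length).foldl (fun s c =>
      if (grid.getD r []).getD c 0 = 0 then
        PySem.Set.add (PySem.Set.add (PySem.Set.add (PySem.Set.add s
          ((r : Int) - 1, (c : Int))) ((r : Int) + 1, (c : Int)))
          ((r : Int), (c : Int) - 1)) ((r : Int), (c : Int) + 1)
      else s) s)
    ((List.range (grid.headD []).length).foldl (fun s (c : Nat) =>
      PySem.Set.add (PySem.Set.add s ((0 : Int), (c : Int))) ((grid.length : Int) - 1, (c : Int)))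
      ((List.range grid.length).foldl (fun s (r : Nat) =>
        PySem.Set.add (PySem.Set.add s ((r : Int), (0 : Int)))
          ((r : Int), ((grid.headD []).length : Int) - 1))
        PySem.Set.empty))

lemma outline_alt_repr (grid : List (List Int))
    (hg : ¬(grid.isEmpty || (grid.headD []).isEmpty) = true) :
    outline_alt grid = (List.range grid.length).map (fun r =>
      (List.range (grid.headD []).length).map (fun c =>
        if vA grid r c ≠ 0 ∧ ((r : Int), (c : Int)) ∈ markB grid
        then vA grid r c else 0)) := by
  unfold outline_alt
  rw [if_neg hg]
  rfl

-- membership through a fold adding two elements per step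
lemma mem_add2 (f g : Nat → Int × Int) (l : List Nat) (s : PySem.Set (Int × Int)) (y : Int × Int) :
    y ∈ l.foldl (fun s b => PySem.Set.add (PySem.Set.add s (f b)) (g b)) s
      ↔ y ∈ s ∨ ∃ b ∈ l, y = f b ∨ y = g b :=
  mem_foldl_step _ (fun b y => y = f b ∨ y = g b)
    (fun s b y => by simp only [PySem.Set.mem_add]; tauto) l s y

-- membership through a fold conditionally adding four elements per step
lemma mem_add4if (P : Nat → Prop) [DecidablePred P] (f1 f2 f3 f4 : Nat → Int × Int)
    (l : List Nat) (s : PySem.Set (Int × Int)) (y : Int × Int) :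
    y ∈ l.foldl (fun s b =>
        if P b then
          PySem.Set.add (PySem.Set.add (PySem.Set.add (PySem.Set.add s
            (f1 b)) (f2 b)) (f3 b)) (f4 b)
        else s) s
      ↔ y ∈ s ∨ ∃ b ∈ l, P b ∧ (y = f1 b ∨ y = f2 b ∨ y = f3 b ∨ y = f4 b) :=
  mem_foldl_step _ (fun b y => P b ∧ (y = f1 b ∨ y = f2 b ∨ y = f3 b ∨ y = f4 b))
    (fun s b y => by
      by_cases h : P b
      · rw [if_pos h]
        simp only [PySem.Set.mem_add, h, true_and]
        tauto
      · rw [if_neg h]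
        simp [h]) l s y

-- full characterization of membership in markB
lemma mem_markB (grid : List (List Int)) (y : Int × Int) :
    y ∈ markB grid ↔
      (∃ r ∈ List.range grid.length,
        y = ((r : Int), (0 : Int)) ∨ y = ((r : Int), ((grid.headD []).length : Int) - 1)) ∨
      (∃ c ∈ List.range (grid.headD []).length,
        y = ((0 : Int), (c : Int)) ∨ y = ((grid.length : Int) - 1, (c : Int))) ∨
      (∃ r ∈ List.range grid.length, ∃ c ∈ List.range (grid.headD []).length,
        vA grid r c = 0 ∧
          (y = ((r : Int) - 1, (c : Int)) ∨ y = ((r : Int) + 1, (c : Int)) ∨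
           y = ((r : Int), (c : Int) - 1) ∨ y = ((r : Int), (c : Int) + 1))) := by
  unfold markB
  rw [mem_foldl_step _
      (fun r y => ∃ c ∈ List.range (grid.headD []).length,
        vA grid r c = 0 ∧
          (y = ((r : Int) - 1, (c : Int)) ∨ y = ((r : Int) + 1, (c : Int)) ∨
           y = ((r : Int), (c : Int) - 1) ∨ y = ((r : Int), (c : Int) + 1)))
      (fun s r y => by
        rw [mem_add4if (fun c => (grid.getD r []).getD c 0 = 0)
          (fun c => ((r : Int) - 1, (c : Int))) (fun c => ((r : Int) + 1, (c : Int)))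
          (fun c => ((r : Int), (c : Int) - 1)) (fun c => ((r : Int), (c : Int) + 1))]
        exact Iff.rfl),
      mem_add2 (fun c => ((0 : Int), (c : Int))) (fun c => ((grid.length : Int) - 1, (c : Int))),
      mem_add2 (fun r => ((r : Int), (0 : Int)))
        (fun r => ((r : Int), ((grid.headD []).length : Int) - 1))]
  have hemp : y ∈ PySem.Set.empty (α := Int × Int) ↔ False := by
    simp [PySem.Set.empty]
  rw [hemp, false_or, or_assoc]

-- for an in-range cell, being marked is exactly A's edge test
lemma mark_iff_EA (grid : List (List Int)) (r c : Nat)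
    (hr : r < grid.length) (hc : c < (grid.headD []).length) :
    (((r : Int), (c : Int)) ∈ markB grid) ↔ EA grid r c = true := by
  have hEA : EA grid r c = true ↔
      ((r : Int) - 1 < 0 ∨ (grid.getD ((r : Int) - 1).toNat []).getD c 0 = 0) ∨
      ((grid.length : Int) ≤ (r : Int) + 1 ∨ (grid.getD (r + 1) []).getD c 0 = 0) ∨
      ((c : Int) - 1 < 0 ∨ (grid.getD r []).getD ((c : Int) - 1).toNat 0 = 0) ∨
      (((grid.headD []).length : Int) ≤ (c : Int) + 1 ∨ (grid.getD r []).getD (c + 1) 0 = 0) := by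
    simp only [EA, List.any_cons, List.any_nil, Bool.or_false, Bool.or_eq_true,
      decide_eq_true_eq]
    have e1 : (r : Int) + (-1) = (r : Int) - 1 := by ring
    have e2 : (c : Int) + (0 : Int) = (c : Int) := by ring
    have e3 : (r : Int) + (0 : Int) = (r : Int) := by ring
    have e4 : (c : Int) + (-1) = (c : Int) - 1 := by ring
    rw [e1, e2, e3, e4]
    have t3 : ((r : Int) + 1).toNat = r + 1 := by omega
    have t4 : ((c : Int) + 1).toNat = c + 1 := by omega
    rw [t3, t4]
    have hf1 : ¬((grid.length : Int) ≤ (r : Int) - 1) := by omega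
    have hf2 : ¬((r : Int) + 1 < 0) := by omega
    have hf3 : ¬((c : Int) < 0) := by omega
    have hf4 : ¬(((grid.headD []).length : Int) ≤ (c : Int)) := by omega
    have hf5 : ¬((r : Int) < 0) := by omega
    have hf6 : ¬((grid.length : Int) ≤ (r : Int)) := by omega
    have hf7 : ¬(((grid.headD []).length : Int) ≤ (c : Int) - 1) := by omega
    have hf8 : ¬((c : Int) + 1 < 0) := by omega
    tauto
  rw [hEA, mem_markB]
  simp only [List.mem_range, Prod.mk.injEq]
  constructor
  · rintro (⟨r', hr', ⟨he1, he2⟩ | ⟨he1, he2⟩⟩ | ⟨c', hc', ⟨he1, he2⟩ | ⟨he1, he2⟩⟩ |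
            ⟨r', hr', c', hc', hz, hn⟩)
    · -- c = 0 : left direction out of bounds
      exact Or.inr (Or.inr (Or.inl (Or.inl (by omega))))
    · -- c = w-1 : right direction out of bounds
      exact Or.inr (Or.inr (Or.inr (Or.inl (by omega))))
    · -- r = 0 : up direction out of bounds
      exact Or.inl (Or.inl (by omega))
    · -- r = h-1 : down direction out of bounds
      exact Or.inr (Or.inl (Or.inl (by omega)))
    · rcases hn with ⟨he1, he2⟩ | ⟨he1, he2⟩ | ⟨he1, he2⟩ | ⟨he1, he2⟩
      · -- (r,c) = (r'-1,c') : zero below, r' = r+1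
        have hr1 : r' = r + 1 := by omega
        have hc1 : c' = c := by omega
        subst hr1; subst hc1
        exact Or.inr (Or.inl (Or.inr (by simpa [vA] using hz)))
      · -- (r,c) = (r'+1,c') : zero above, r' = r-1
        have ht : ((r : Int) - 1).toNat = r' := by omega
        have hc1 : c' = c := by omega
        subst hc1
        refine Or.inl (Or.inr ?_)
        rw [ht]
        simpa [vA] using hz
      · -- (r,c) = (r',c'-1) : zero right, c' = c+1
        have hr1 : r' = r := by omega
        have hc1 : c' = c + 1 := by omega
        subst hr1; subst hc1
        exact Or.inr (Or.inr (Or.inr (Or.inr (by simpa [vA] using hz))))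
      · -- (r,c) = (r',c'+1) : zero left, c' = c-1
        have hr1 : r' = r := by omega
        have ht : ((c : Int) - 1).toNat = c' := by omega
        subst hr1
        refine Or.inr (Or.inr (Or.inl (Or.inr ?_)))
        rw [ht]
        simpa [vA] using hz
  · rintro (h | h | h | h)
    · rcases h with h | h
      · -- ↑r - 1 < 0 : r = 0, border row
        exact Or.inr (Or.inl ⟨c, hc, Or.inl ⟨by omega, rfl⟩⟩)
      · -- zero above at (r-1, c)
        by_cases hr0 : r = 0
        · exact Or.inr (Or.inl ⟨c, hc, Or.inl ⟨by simp [hr0], rfl⟩⟩)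
        · have ht : ((r : Int) - 1).toNat = r - 1 := by omega
          rw [ht] at h
          exact Or.inr (Or.inr ⟨r - 1, by omega, c, hc,
            by simpa [vA] using h, Or.inr (Or.inl ⟨by omega, rfl⟩)⟩)
    · rcases h with h | h
      · -- r = h - 1 : border row
        exact Or.inr (Or.inl ⟨c, hc, Or.inr ⟨by omega, rfl⟩⟩)
      · -- zero below at (r+1, c); if r+1 = h it is the border row instead
        by_cases hin : r + 1 < grid.length
        · exact Or.inr (Or.inr ⟨r + 1, hin, c, hc,
            by simpa [vA] using h, Or.inl ⟨by omega, rfl⟩⟩)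
        · exact Or.inr (Or.inl ⟨c, hc, Or.inr ⟨by omega, rfl⟩⟩)
    · rcases h with h | h
      · -- ↑c - 1 < 0 : c = 0, border column
        exact Or.inl ⟨r, hr, Or.inl ⟨rfl, by omega⟩⟩
      · -- zero left at (r, c-1)
        by_cases hc0 : c = 0
        · exact Or.inl ⟨r, hr, Or.inl ⟨rfl, by simp [hc0]⟩⟩
        · have ht : ((c : Int) - 1).toNat = c - 1 := by omega
          rw [ht] at h
          exact Or.inr (Or.inr ⟨r, hr, c - 1, by omega,
            by simpa [vA] using h, Or.inr (Or.inr (Or.inr ⟨rfl, by omega⟩))⟩)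
    · rcases h with h | h
      · -- c = w - 1 : border column
        exact Or.inl ⟨r, hr, Or.inr ⟨rfl, by omega⟩⟩
      · by_cases hin : c + 1 < (grid.headD []).length
        · exact Or.inr (Or.inr ⟨r, hr, c + 1, hin,
            by simpa [vA] using h, Or.inr (Or.inr (Or.inl ⟨rfl, by omega⟩))⟩)
        · exact Or.inl ⟨r, hr, Or.inr ⟨rfl, by omega⟩⟩

-- ===== VERDICT (by name: the statement is the Claim_ definition above) =====
theorem outline_spec : Claim_equal_outline := by
  intro grid _ _
  unfold Spec_outline
  by_cases hg : grid = [] ∨ grid.headD [] = []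
  · unfold outline outline_alt
    rw [if_pos hg, if_pos (by rcases hg with h | h
                              · simp [h]
                              · rw [h]; simp)]
  · have hg' : ¬(grid.isEmpty || (grid.headD []).isEmpty) = true := by
      simp only [Bool.or_eq_true, List.isEmpty_iff]; tauto
    rw [A_repr grid hg, outline_alt_repr grid hg']
    apply List.map_congr_left
    intro r hrm
    apply List.map_congr_left
    intro c hcm
    have hr : r < grid.length := List.mem_range.mp hrm
    have hc : c < (grid.headD []).length := List.mem_range.mp hcm
    by_cases hv : vA grid r c = 0
    · simp [hv]
    · by_cases hE : EA grid r c
      · rw [if_pos (by simp [hv, hE]), if_pos ⟨hv, (mark_iff_EA grid r c hr hc).mpr hE⟩]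
      · rw [if_neg (by simp [hE]),
            if_neg (fun hcon => hE ((mark_iff_EA grid r c hr hc).mp hcon.2))]
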